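-- pv_equiv track=rewrite | github.com/KelseyKwon/coding-test-python-book | c06/11.py | solution
-- ===== SOURCE A (Python) =====
-- def solution(s):
--     answer = -1
--     n = len(s)
--     stack = []
--     for i in range(n):
--         if stack and s[i] == stack[-1]:
--             stack.pop()
--         else:
--             stack.append(s[i])
--
--     if not stack:
--         answer = 1
--     else:
--         answer = 0
--
--     return answer
-- ===== SOURCE B (Python) =====
-- def _remove_first_pair(chars):
--     # return a new list with the first adjacent equal pair removed, or None
--     for i in range(len(chars) - 1):
--         if chars[i] == chars[i + 1]:
--             return chars[:i] + chars[i + 2:]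
--     return None
--
--
-- def solution(s):
--     chars = list(s)
--     while True:
--         r = _remove_first_pair(chars)
--         if r is None:
--             break
--         chars = r
--     return 1 if not chars else 0
-- ===== Notes on version B (the rewrite author's own statement) =====
-- stated objective: alternative
-- what changed: Replaces the single stack pass with repeated rescans that delete the first adjacent equal pair until none remains, relying on confluence of pair removal.
import Mathlib
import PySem

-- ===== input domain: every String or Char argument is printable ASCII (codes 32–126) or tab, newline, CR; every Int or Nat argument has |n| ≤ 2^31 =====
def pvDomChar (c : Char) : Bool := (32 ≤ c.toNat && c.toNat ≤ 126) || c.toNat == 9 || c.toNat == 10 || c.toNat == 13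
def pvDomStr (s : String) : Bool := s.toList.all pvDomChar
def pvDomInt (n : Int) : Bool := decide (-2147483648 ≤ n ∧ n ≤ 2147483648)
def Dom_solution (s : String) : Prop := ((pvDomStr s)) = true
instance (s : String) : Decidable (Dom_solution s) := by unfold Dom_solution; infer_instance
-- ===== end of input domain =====

-- B (alternative, same cost class not claimed faster): repeatedly delete the first adjacent
-- equal pair until none remains, instead of A's single stack pass; return value only.

-- ===== PORT A =====
-- stack step: top of the Python stack (stack[-1]) is kept at the head of the Lean list
def pvStep (st : List Char) (c : Char) : List Char :=
  match st with
  | top :: rest => if c = top then rest else c :: top :: rest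
  | [] => [c]

def solution (s : String) : Int :=
  let stack := s.toList.foldl pvStep []
  if stack = [] then 1 else 0

-- ===== PORT B =====
-- scan for the first adjacent equal pair; remove it, or return none
def pvRemovePair : List Char → Option (List Char)
  | a :: b :: t => if a = b then some t else (pvRemovePair (b :: t)).map (a :: ·)
  | _ => none

theorem pvRemovePair_length : ∀ {l l' : List Char}, pvRemovePair l = some l' → l'.length < l.length := by
  intro l
  induction l with
  | nil => intro l' h; simp [pvRemovePair] at h
  | cons a t ih =>
    intro l' h
    match t, h with
    | b :: t', h =>
      by_cases hab : a = b
      · simp [pvRemovePair, hab] at h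
        subst h; simp
      · simp [pvRemovePair, hab] at h
        obtain ⟨r, hr, hl⟩ := h
        have := ih hr
        subst hl; simpa using Nat.succ_lt_succ this

def pvLoop (l : List Char) : List Char :=
  match h : pvRemovePair l with
  | none => l
  | some l' => pvLoop l'
termination_by l.length
decreasing_by exact pvRemovePair_length h

def solution_alt (s : String) : Int :=
  if pvLoop s.toList = [] then 1 else 0

-- ===== PRECONDITION & SPEC =====
def Spec_solution (s : String) (out : Int) : Prop := out = solution_alt s
instance (s : String) (out : Int) : Decidable (Spec_solution s out) := by unfold Spec_solution; infer_instance

-- ===== CLAIM (what is proved, stated in full; the proofs are below) =====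
def Claim_equal_solution : Prop := ∀ (s : String), Dom_solution s → Spec_solution s (solution s)

-- ===== LEMMAS AND PROOFS =====

-- the stack built by the fold never has two equal adjacent elements
theorem pvStep_chain (st : List Char) (c : Char) (h : List.IsChain (· ≠ ·) st) :
    List.IsChain (· ≠ ·) (pvStep st c) := by
  match st, h with
  | [], _ => simp [pvStep]
  | t :: r, h =>
    by_cases hc : c = t
    · simp only [pvStep, if_pos hc]
      exact h.tail
    · simp only [pvStep, if_neg hc]
      exact List.isChain_cons_cons.mpr ⟨hc, h⟩

-- on a duplicate-free stack, pushing the same character twice is a no-op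
theorem pvStep_step (st : List Char) (a : Char) (h : List.IsChain (· ≠ ·) st) :
    pvStep (pvStep st a) a = st := by
  match st with
  | [] => simp [pvStep]
  | t :: r =>
    by_cases hat : a = t
    · subst hat
      match r with
      | [] => simp [pvStep]
      | u :: r' =>
        have hau : a ≠ u := (List.isChain_cons_cons.mp h).1
        simp [pvStep, hau]
    · simp [pvStep, hat]

-- removing an adjacent equal pair does not change the stack fold
theorem pvFold_removePair : ∀ (l l' : List Char) (st : List Char),
    List.IsChain (· ≠ ·) st →
    pvRemovePair l = some l' → l.foldl pvStep st = l'.foldl pvStep st := by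
  intro l
  induction l with
  | nil => intro l' st _ h; simp [pvRemovePair] at h
  | cons a t ih =>
    intro l' st hch h
    match t, h with
    | b :: t', h =>
      by_cases hab : a = b
      · simp [pvRemovePair, hab] at h
        subst h hab
        simp [List.foldl, pvStep_step st a hch]
      · simp [pvRemovePair, hab] at h
        obtain ⟨r, hr, hl⟩ := h
        subst hl
        simpa [List.foldl] using ih r (pvStep st a) (pvStep_chain st a hch) hr

-- the loop does not change the stack fold
theorem pvFold_loop : ∀ (l : List Char) (st : List Char),
    List.IsChain (· ≠ ·) st → (pvLoop l).foldl pvStep st = l.foldl pvStep st := by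
  intro l
  induction l using pvLoop.induct with
  | case1 l h => intro st _; rw [pvLoop, h]
  | case2 l l' h ih =>
    intro st hch
    rw [pvLoop, h]
    rw [ih st hch, pvFold_removePair l l' st hch h]

-- the loop result has no adjacent equal pair
theorem pvLoop_none : ∀ (l : List Char), pvRemovePair (pvLoop l) = none := by
  intro l
  induction l using pvLoop.induct with
  | case1 l h => rw [pvLoop, h]; exact h
  | case2 l l' h ih => rw [pvLoop, h]; exact ih

-- on a pair-free list, the stack fold just reverses (given a safe boundary)
theorem pvFold_pairfree : ∀ (l st : List Char),
    pvRemovePair l = none →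
    (∀ t r c l'', st = t :: r → l = c :: l'' → c ≠ t) →
    l.foldl pvStep st = l.reverse ++ st := by
  intro l
  induction l with
  | nil => intro st _ _; simp
  | cons c l' ih =>
    intro st hnone hb
    have hstep : pvStep st c = c :: st := by
      match st with
      | [] => simp [pvStep]
      | t :: r => simp [pvStep, hb t r c l' rfl rfl]
    have hnone' : pvRemovePair l' = none := by
      match l' with
      | [] => simp [pvRemovePair]
      | b :: t' =>
        by_cases hcb : c = b
        · simp [pvRemovePair, hcb] at hnone
        · simp [pvRemovePair, hcb] at hnone
          exact hnone
    have hb' : ∀ t r d l'', c :: st = t :: r → l' = d :: l'' → d ≠ t := by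
      intro t r d l'' hst hl
      injection hst with h1 _
      subst h1 hl
      intro hdc
      subst hdc
      simp [pvRemovePair] at hnone
    have := ih (c :: st) hnone' hb'
    simp [List.foldl, hstep, this]

-- ===== VERDICT (by name: the statement is the Claim_ definition above) =====
theorem solution_spec : Claim_equal_solution := by
  unfold Claim_equal_solution
  intro s _
  unfold Spec_solution solution solution_alt
  have h1 : s.toList.foldl pvStep [] = (pvLoop s.toList).foldl pvStep [] :=
    (pvFold_loop s.toList [] (by simp)).symm
  have h2 : (pvLoop s.toList).foldl pvStep [] = (pvLoop s.toList).reverse ++ [] := by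
    apply pvFold_pairfree _ _ (pvLoop_none s.toList)
    intro t r c l'' hst _; simp at hst
  simp only [h1, h2, List.append_nil]
  by_cases h : pvLoop s.toList = [] <;> simp [h]
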